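-- pv_equiv track=rewrite | github.com/codesbya8h1/codecomprehender | code_comprehender/java_parser.py | _extract_package_and_imports
-- ===== SOURCE A (Python) =====
-- from typing import List, Tuple
--
-- def _extract_package_and_imports(code: str) -> Tuple[str, List[str]]:
--     """Extract package declaration and import statements.
--
--     Args:
--         code: Java source code
--
--     Returns:
--         Tuple of (package_name, list_of_imports)
--     """
--     lines = code.split("\n")
--     package = None
--     imports = []
--
--     for line in lines:
--         line = line.strip()
--         if line.startswith("package "):
--             package = line
--         elif line.startswith("import "):
--             imports.append(line)
--         elif line and not line.startswith("//") and not line.startswith("/*"):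
--             # Stop at first non-comment, non-import, non-package line
--             break
--
--     return package, imports
-- ===== SOURCE B (Python) =====
-- from itertools import takewhile
-- from typing import List, Tuple
--
-- def _extract_package_and_imports(code: str) -> Tuple[str, List[str]]:
--     """Extract package declaration and import statements (takewhile over the header region)."""
--     def keep(line):
--         return (not line or line.startswith("//") or line.startswith("/*")
--                 or line.startswith("package ") or line.startswith("import "))
--     header = list(takewhile(keep, (l.strip() for l in code.split("\n"))))
--     package = None
--     for line in header:
--         if line.startswith("package "):
--             package = line
--     imports = [line for line in header if line.startswith("import ")]
--     return package, imports
-- ===== Notes on version B (the rewrite author's own statement) =====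
-- stated objective: alternative
-- what changed: Replaces the single stateful for-loop with break by itertools.takewhile collecting the header prefix, then a last-wins pass for the package line and a list comprehension for the imports.
import Mathlib
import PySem

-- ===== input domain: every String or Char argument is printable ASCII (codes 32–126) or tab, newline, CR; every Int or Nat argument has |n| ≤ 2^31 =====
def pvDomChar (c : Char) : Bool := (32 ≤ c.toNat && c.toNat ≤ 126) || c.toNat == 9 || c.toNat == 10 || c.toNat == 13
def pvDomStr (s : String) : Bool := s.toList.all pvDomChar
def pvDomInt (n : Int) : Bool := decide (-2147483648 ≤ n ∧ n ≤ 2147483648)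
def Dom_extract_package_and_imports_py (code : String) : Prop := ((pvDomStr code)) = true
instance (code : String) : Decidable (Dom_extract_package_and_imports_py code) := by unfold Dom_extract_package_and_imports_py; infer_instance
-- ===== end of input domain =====

-- B replaces A's single stateful break-loop by takewhile over the header region followed by
-- a last-package fold and an import filter (objective: different decomposition, same cost).

-- ===== PORT A =====
-- A's for-loop with break: recursion over the lines carrying (package, imports).
def pvLoopA : List String → Option String → List String → Option String × List String
  | [], package, imports => (package, imports)
  | l :: rest, package, imports =>
    let line := PySem.Str.strip l
    if PySem.Str.startswith line "package " then pvLoopA rest (some line) imports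
    else if PySem.Str.startswith line "import " then pvLoopA rest package (imports ++ [line])
    else if !(line == "") && !PySem.Str.startswith line "//" && !PySem.Str.startswith line "/*" then
      (package, imports)  -- break
    else pvLoopA rest package imports

def extract_package_and_imports_py (code : String) : Option String × List String :=
  -- code.split("\n"): the separator is the nonempty literal "\n", so split? is always some
  let lines := (PySem.Str.split? code "\n").getD []
  pvLoopA lines none []

-- ===== PORT B =====
def pvKeep (line : String) : Bool :=
  (line == "") || PySem.Str.startswith line "//" || PySem.Str.startswith line "/*"
    || PySem.Str.startswith line "package " || PySem.Str.startswith line "import "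

def extract_package_and_imports_py_alt (code : String) : Option String × List String :=
  let header := (((PySem.Str.split? code "\n").getD []).map PySem.Str.strip).takeWhile pvKeep
  (header.foldl (fun package line => if PySem.Str.startswith line "package " then some line else package) none,
   header.filter (fun line => PySem.Str.startswith line "import "))

-- ===== PRECONDITION & SPEC =====
def Spec_extract_package_and_imports_py (code : String) (out : Option String × List String) : Prop := out = extract_package_and_imports_py_alt code
instance (code : String) (out : Option String × List String) : Decidable (Spec_extract_package_and_imports_py code out) := by unfold Spec_extract_package_and_imports_py; infer_instance

-- ===== CLAIM (what is proved, stated in full; the proofs are below) =====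
def Claim_equal_extract_package_and_imports_py : Prop := ∀ (code : String), Dom_extract_package_and_imports_py code → Spec_extract_package_and_imports_py code (extract_package_and_imports_py code)

-- ===== LEMMAS AND PROOFS =====

-- a line starting with "package " does not start with "import "
lemma pkg_not_imp (s : String) (h : PySem.Str.startswith s "package " = true) :
    PySem.Str.startswith s "import " = false := by
  simp only [PySem.Str.startswith_eq, PySem.Chars.startswith_iff] at h
  obtain ⟨t, ht⟩ := h
  simp only [PySem.Str.startswith_eq]
  rw [← Bool.not_eq_true, PySem.Chars.startswith_iff, ← ht]
  intro hc
  obtain ⟨u, hu⟩ := hc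
  simp at hu

-- B's takewhile predicate is the negation of A's break condition, in A's terms
lemma keep_iff (s : String) :
    pvKeep s = (!(!(s == "") && !PySem.Str.startswith s "//" && !PySem.Str.startswith s "/*")
      || PySem.Str.startswith s "package " || PySem.Str.startswith s "import ") := by
  unfold pvKeep
  cases (s == "") <;> cases PySem.Str.startswith s "//" <;> cases PySem.Str.startswith s "/*" <;>
    cases PySem.Str.startswith s "package " <;> cases PySem.Str.startswith s "import " <;> rfl

-- loop invariant: A's break-loop equals B's fold/filter over the kept header prefix
lemma loopA_eq (ls : List String) : ∀ (p : Option String) (i : List String),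
    pvLoopA ls p i =
      (((ls.map PySem.Str.strip).takeWhile pvKeep).foldl
          (fun package line => if PySem.Str.startswith line "package " then some line else package) p,
        i ++ ((ls.map PySem.Str.strip).takeWhile pvKeep).filter
          (fun line => PySem.Str.startswith line "import ")) := by
  induction ls with
  | nil => intro p i; simp only [pvLoopA, List.map_nil, List.takeWhile_nil, List.foldl_nil,
      List.filter_nil, List.append_nil]
  | cons l rest ih =>
    intro p i
    simp only [pvLoopA, List.map_cons, List.takeWhile_cons]
    by_cases hp : PySem.Str.startswith (PySem.Str.strip l) "package " = true
    · have hk : pvKeep (PySem.Str.strip l) = true := by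
        rw [keep_iff, hp]; simp
      rw [if_pos hp, if_pos hk, ih]
      simp only [List.foldl_cons, List.filter_cons, if_pos hp,
        pkg_not_imp _ hp, Bool.false_eq_true, if_false]
    · have hp' : PySem.Str.startswith (PySem.Str.strip l) "package " = false :=
        Bool.eq_false_iff.mpr hp
      by_cases hi : PySem.Str.startswith (PySem.Str.strip l) "import " = true
      · have hk : pvKeep (PySem.Str.strip l) = true := by
          rw [keep_iff, hi]; simp
        rw [if_neg hp, if_pos hi, if_pos hk, ih]
        simp only [List.foldl_cons, List.filter_cons, if_pos hi, hp', Bool.false_eq_true,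
          if_false]
        rw [← List.append_cons]
      · have hi' : PySem.Str.startswith (PySem.Str.strip l) "import " = false :=
          Bool.eq_false_iff.mpr hi
        by_cases hb : (!(PySem.Str.strip l == "") && !PySem.Str.startswith (PySem.Str.strip l) "//"
            && !PySem.Str.startswith (PySem.Str.strip l) "/*") = true
        · have hk : pvKeep (PySem.Str.strip l) = false := by
            rw [keep_iff, hp', hi', hb]
            simp only [Bool.not_true, Bool.or_false]
          rw [if_neg hp, if_neg hi, if_pos hb, if_neg (by simp [hk])]
          simp only [List.foldl_nil, List.filter_nil, List.append_nil]
        · have hb' : (!(PySem.Str.strip l == "") && !PySem.Str.startswith (PySem.Str.strip l) "//"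
              && !PySem.Str.startswith (PySem.Str.strip l) "/*") = false := Bool.eq_false_iff.mpr hb
          have hk : pvKeep (PySem.Str.strip l) = true := by
            rw [keep_iff, hp', hi', hb']
            simp only [Bool.not_false, Bool.or_false]
          rw [if_neg hp, if_neg hi, if_neg hb, if_pos hk, ih]
          simp only [List.foldl_cons, List.filter_cons, hp', hi',
            Bool.false_eq_true, if_false]

-- ===== VERDICT (by name: the statement is the Claim_ definition above) =====
theorem extract_package_and_imports_py_spec : Claim_equal_extract_package_and_imports_py := by
  intro code _
  unfold Spec_extract_package_and_imports_py extract_package_and_imports_py extract_package_and_imports_py_alt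
  simp [loopA_eq]
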